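-- pv_equiv track=rewrite | github.com/alexcockburn1/AoC2024 | prob22.py | get_changes_dict
-- ===== SOURCE A (Python) =====
-- from collections import Counter
--
-- def get_changes_dict(length, price_list):
--     differences = [a - b for a, b in zip(price_list[1:], price_list)]
--     differences_counter = Counter()
--     for i in range(len(differences) - length + 1):
--         key = tuple(differences[i:i + length])
--         if key not in differences_counter:
--             differences_counter[key] = price_list[i + length]
--     return differences_counter
-- ===== SOURCE B (Python) =====
-- from collections import Counter
--
-- def get_changes_dict(length, price_list):
--     # One pass over prices with a rolling window of the last `length`
--     # differences (no precomputed differences list, no slicing, no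
--     # membership guard: setdefault keeps the first occurrence).
--     result = Counter()
--     window = ()
--     for j in range(1, len(price_list)):
--         window += (price_list[j] - price_list[j - 1],)
--         if len(window) > length:
--             window = window[1:]
--         if len(window) == length:
--             result.setdefault(window, price_list[j])
--     return result
-- ===== Notes on version B (the rewrite author's own statement) =====
-- stated objective: alternative
-- what changed: B makes one pass over the prices maintaining a rolling tuple of the last `length` differences and uses setdefault, instead of A's precomputed differences list, per-index slicing and explicit membership guard.
-- outside the precondition, e.g. on get_changes_dict(0, [5]): A returns {(): 5}, B returns {}; on get_changes_dict(-1, [5, 3, 4]): A returns {(): 5, (-2,): 4}, B returns {}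
import Mathlib
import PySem

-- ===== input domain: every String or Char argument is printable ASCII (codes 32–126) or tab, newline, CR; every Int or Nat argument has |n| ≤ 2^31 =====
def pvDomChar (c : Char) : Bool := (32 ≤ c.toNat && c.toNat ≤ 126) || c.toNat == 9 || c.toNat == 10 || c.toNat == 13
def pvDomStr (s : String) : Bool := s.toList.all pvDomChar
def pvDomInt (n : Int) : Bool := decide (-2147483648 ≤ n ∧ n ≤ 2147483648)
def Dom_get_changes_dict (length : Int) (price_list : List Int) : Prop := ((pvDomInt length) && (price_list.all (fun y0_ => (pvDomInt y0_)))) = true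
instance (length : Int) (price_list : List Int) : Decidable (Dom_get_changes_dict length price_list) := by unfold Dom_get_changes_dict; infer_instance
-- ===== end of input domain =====

-- B replaces A's precomputed differences list, per-index slicing and membership guard by a
-- single pass with a rolling window of the last `length` differences and setdefault (alternative decomposition, same cost).

-- ===== PORT A =====
def get_changes_dict (length : Int) (price_list : List Int) : List (List Int × Int) :=
  let differences := ((PySem.List.slice price_list (some 1) none).zip price_list).map (fun ab => ab.1 - ab.2)
  let d := (PySem.List.pyRange 0 (PySem.List.len differences - length + 1) 1).foldl
    (fun d i =>
      let key := PySem.List.slice differences (some i) (some (i + length))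
      if d.contains key then d
      else d.insert key (PySem.List.pyGetD price_list (i + length) 0))
    (PySem.Dict.empty : PySem.Dict (List Int) Int)
  d.items

-- ===== PORT B =====
def get_changes_dict_alt (length : Int) (price_list : List Int) : List (List Int × Int) :=
  let st := (PySem.List.pyRange 1 (PySem.List.len price_list) 1).foldl
    (fun st j =>
      let w := st.2 ++ [PySem.List.pyGetD price_list j 0 - PySem.List.pyGetD price_list (j - 1) 0]
      let w := if PySem.List.len w > length then PySem.List.slice w (some 1) none else w
      let r := if PySem.List.len w == length then st.1.setdefault w (PySem.List.pyGetD price_list j 0) else st.1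
      (r, w))
    ((PySem.Dict.empty : PySem.Dict (List Int) Int), ([] : List Int))
  st.1.items

-- ===== PRECONDITION & SPEC =====
-- Pre_ excludes length ≤ 0, the degenerate window sizes on which A either raises IndexError
-- (e.g. length = 0 on an empty list) or returns values that hinge on negative-index wraparound
-- into price_list and on empty slice keys — artefacts of A's implementation, not window mapping.
def Pre_get_changes_dict (length : Int) (price_list : List Int) : Prop := 1 ≤ length
instance (length : Int) (price_list : List Int) : Decidable (Pre_get_changes_dict length price_list) := by unfold Pre_get_changes_dict; infer_instance
def pvWitness_get_changes_dict : Int × List Int := (2, [5, 3, 4])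

def Spec_get_changes_dict (length : Int) (price_list : List Int) (out : List (List Int × Int)) : Prop := out = get_changes_dict_alt length price_list
instance (length : Int) (price_list : List Int) (out : List (List Int × Int)) : Decidable (Spec_get_changes_dict length price_list out) := by unfold Spec_get_changes_dict; infer_instance

-- ===== CLAIM (what is proved, stated in full; the proofs are below) =====
def Claim_equal_get_changes_dict : Prop := ∀ (length : Int) (price_list : List Int), Dom_get_changes_dict length price_list → Pre_get_changes_dict length price_list → Spec_get_changes_dict length price_list (get_changes_dict length price_list)

-- ===== LEMMAS AND PROOFS =====

-- the differences list both programs are about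
def pvDiffs (p : List Int) : List Int := ((p.drop 1).zip p).map (fun ab => ab.1 - ab.2)

theorem pvDiffs_length (p : List Int) : (pvDiffs p).length = p.length - 1 := by
  simp [pvDiffs]

theorem pvDiffs_getElem (p : List Int) (t : Nat) (ht : t < (pvDiffs p).length) :
    (pvDiffs p)[t] = p.getD (t + 1) 0 - p.getD t 0 := by
  have hlen := pvDiffs_length p
  simp only [pvDiffs, List.getElem_map, List.getElem_zip, List.getElem_drop]
  rw [List.getD_eq_getElem _ _ (by omega), List.getD_eq_getElem _ _ (by omega)]
  simp [Nat.add_comm 1 t]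

-- A's loop body
def pvStepA (p : List Int) (L : Int) (d : PySem.Dict (List Int) Int) (i : Int) : PySem.Dict (List Int) Int :=
  let key := PySem.List.slice (pvDiffs p) (some i) (some (i + L))
  if d.contains key then d
  else d.insert key (PySem.List.pyGetD p (i + L) 0)

-- B's loop body
def pvStepB (p : List Int) (L : Int) (st : PySem.Dict (List Int) Int × List Int) (j : Int) :
    PySem.Dict (List Int) Int × List Int :=
  let w := st.2 ++ [PySem.List.pyGetD p j 0 - PySem.List.pyGetD p (j - 1) 0]
  let w := if PySem.List.len w > L then PySem.List.slice w (some 1) none else w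
  let r := if PySem.List.len w == L then st.1.setdefault w (PySem.List.pyGetD p j 0) else st.1
  (r, w)

-- the common invariant: after B has processed j = 1..t, its dict equals A's fold over the
-- window starts 0..t-length and its window is the last ≤ length differences among the first t
theorem pv_loop (p : List Int) (L : Int) (hL : 1 ≤ L) (t : Nat) (ht : t ≤ (pvDiffs p).length) :
    (PySem.List.pyRange 1 ((t : Int) + 1) 1).foldl (pvStepB p L) (PySem.Dict.empty, []) =
      ((PySem.List.pyRange 0 ((t : Int) + 1 - L) 1).foldl (pvStepA p L) PySem.Dict.empty,
       ((pvDiffs p).take t).drop (t - L.toNat)) := by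
  induction t with
  | zero =>
    rw [PySem.List.pyRange_one_eq_nil (by omega), PySem.List.pyRange_one_eq_nil (by omega)]
    simp
  | succ t ih =>
    have hm : t < (pvDiffs p).length := by omega
    have hcast : (((t + 1 : Nat) : Int)) + 1 = ((t : Int) + 1) + 1 := by omega
    rw [hcast, PySem.List.pyRange_one_succ_right (by omega), List.foldl_append, ih (by omega)]
    -- one step of B's loop
    rw [List.foldl_cons, List.foldl_nil]
    simp only [pvStepB]
    have hget : PySem.List.pyGetD p ((t : Int) + 1) 0 - PySem.List.pyGetD p ((t : Int) + 1 - 1) 0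
        = (pvDiffs p)[t] := by
      have h1 : ((t : Int) + 1) = ((t + 1 : Nat) : Int) := by omega
      have h2 : ((t : Int) + 1 - 1) = ((t : Nat) : Int) := by omega
      rw [h2, h1, PySem.List.pyGetD_natCast, PySem.List.pyGetD_natCast,
        pvDiffs_getElem p t hm]
    rw [hget]
    have htake : (pvDiffs p).take (t + 1) = (pvDiffs p).take t ++ [(pvDiffs p)[t]] := by
      rw [List.take_add_one, List.getElem?_eq_getElem hm]
      rfl
    have hw' : ((pvDiffs p).take t).drop (t - L.toNat) ++ [(pvDiffs p)[t]]
        = ((pvDiffs p).take (t + 1)).drop (t - L.toNat) := by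
      rw [htake, List.drop_append_of_le_length (by simp; omega)]
    rw [hw']
    have hlen' : (((pvDiffs p).take (t + 1)).drop (t - L.toNat)).length = t + 1 - (t - L.toNat) := by
      simp
      omega
    by_cases htrim : L.toNat ≤ t
    · -- window overflows: trim to the last L differences
      have htail : (((pvDiffs p).take (t + 1)).drop (t - L.toNat)).tail
          = ((pvDiffs p).take (t + 1)).drop (t + 1 - L.toNat) := by
        rw [List.tail_drop]
        congr 1
        omega
      have hc1 : PySem.List.len (((pvDiffs p).take (t + 1)).drop (t - L.toNat)) > L := by
        rw [PySem.List.len_eq, hlen']; omega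
      rw [if_pos hc1, PySem.List.slice_from_one, htail]
      have hlen2 : (((pvDiffs p).take (t + 1)).drop (t + 1 - L.toNat)).length = L.toNat := by
        simp; omega
      have hc2 : (PySem.List.len (((pvDiffs p).take (t + 1)).drop (t + 1 - L.toNat)) == L) = true := by
        rw [PySem.List.len_eq, hlen2]; simp; omega
      rw [if_pos hc2]
      -- A performs the insert for window start t + 1 - L
      have hA : ((t : Int) + 1) + 1 - L = ((t : Int) + 1 - L) + 1 := by omega
      rw [hA, PySem.List.pyRange_one_succ_right (by omega), List.foldl_append,
        List.foldl_cons, List.foldl_nil]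
      refine Prod.ext ?_ rfl
      simp only [pvStepA]
      have hi : (t : Int) + 1 - L = ((t + 1 - L.toNat : Nat) : Int) := by omega
      have hi2 : (t : Int) + 1 - L + L = ((t + 1 : Nat) : Int) := by omega
      have hkey : PySem.List.slice (pvDiffs p) (some ((t : Int) + 1 - L)) (some ((t : Int) + 1 - L + L))
          = ((pvDiffs p).take (t + 1)).drop (t + 1 - L.toNat) := by
        rw [hi2, hi, PySem.List.slice_natCast, List.drop_take]
      rw [hkey, hi2]
      by_cases hc : PySem.Dict.contains (List.foldl (pvStepA p L) PySem.Dict.empty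
          (PySem.List.pyRange 0 ((t : Int) + 1 - L) 1))
          (((pvDiffs p).take (t + 1)).drop (t + 1 - L.toNat)) = true
      · rw [if_pos hc]; exact PySem.Dict.setdefault_of_contains _ _ hc
      · rw [if_neg (by simpa using hc)]
        exact PySem.Dict.setdefault_of_not_contains _ _ (by simpa using hc)
    · -- window not yet full after append (t < L)
      have hc1 : ¬ (PySem.List.len (((pvDiffs p).take (t + 1)).drop (t - L.toNat)) > L) := by
        rw [PySem.List.len_eq, hlen']
        have : (pvDiffs p).length ≥ t + 1 := ht
        omega
      rw [if_neg hc1]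
      have hdrop : t - L.toNat = 0 := by omega
      have hdrop' : t + 1 - L.toNat = 0 := by omega
      have hlen1 : (((pvDiffs p).take (t + 1)).drop (t - L.toNat)).length = t + 1 := by
        rw [hlen']; omega
      by_cases hfull : t + 1 = L.toNat
      · -- the window just reached length L: A's first insert (start index 0)
        have hc2 : (PySem.List.len (((pvDiffs p).take (t + 1)).drop (t - L.toNat)) == L) = true := by
          rw [PySem.List.len_eq, hlen1]; simp; omega
        rw [if_pos hc2]
        have hA : ((t : Int) + 1) + 1 - L = ((t : Int) + 1 - L) + 1 := by omega
        rw [hA, PySem.List.pyRange_one_succ_right (by omega), List.foldl_append,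
          List.foldl_cons, List.foldl_nil]
        refine Prod.ext ?_ (by rw [hdrop, hdrop'])
        simp only [pvStepA]
        have hi : (t : Int) + 1 - L = ((0 : Nat) : Int) := by omega
        have hi2 : (t : Int) + 1 - L + L = ((t + 1 : Nat) : Int) := by omega
        have hkey : PySem.List.slice (pvDiffs p) (some ((t : Int) + 1 - L)) (some ((t : Int) + 1 - L + L))
            = ((pvDiffs p).take (t + 1)).drop (t - L.toNat) := by
          rw [hi2, hi, PySem.List.slice_natCast, hdrop, List.drop_zero, List.drop_zero,
            Nat.sub_zero]
        rw [hkey, hi2]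
        by_cases hc : PySem.Dict.contains (List.foldl (pvStepA p L) PySem.Dict.empty
            (PySem.List.pyRange 0 ((t : Int) + 1 - L) 1))
            (((pvDiffs p).take (t + 1)).drop (t - L.toNat)) = true
        · rw [if_pos hc]; exact PySem.Dict.setdefault_of_contains _ _ hc
        · rw [if_neg (by simpa using hc)]
          exact PySem.Dict.setdefault_of_not_contains _ _ (by simpa using hc)
      · -- window still shorter than L: nothing inserted, A's range is still empty
        have hc2 : ¬ ((PySem.List.len (((pvDiffs p).take (t + 1)).drop (t - L.toNat)) == L) = true) := by
          rw [PySem.List.len_eq, hlen1]; simp; omega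
        rw [if_neg hc2]
        rw [PySem.List.pyRange_one_eq_nil (show (t : Int) + 1 + 1 - L ≤ 0 by omega),
          PySem.List.pyRange_one_eq_nil (show (t : Int) + 1 - L ≤ 0 by omega)]
        rw [hdrop, hdrop']

theorem get_changes_dict_spec : Claim_equal_get_changes_dict := by
  intro L p _ hPre
  unfold Pre_get_changes_dict at hPre
  unfold Spec_get_changes_dict get_changes_dict get_changes_dict_alt
  have hds : ((PySem.List.slice p (some 1) none).zip p).map (fun ab => ab.1 - ab.2) = pvDiffs p := by
    simp [PySem.List.slice_from_one, pvDiffs, List.drop_one]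
  simp only [hds, PySem.List.len_eq]
  have hrange : PySem.List.pyRange 1 (p.length : Int) 1
      = PySem.List.pyRange 1 (((pvDiffs p).length : Int) + 1) 1 := by
    have hm := pvDiffs_length p
    cases hn : p.length with
    | zero =>
      rw [PySem.List.pyRange_one_eq_nil (by omega), PySem.List.pyRange_one_eq_nil (by omega)]
    | succ k =>
      congr 1
      omega
  rw [hrange]
  have hb : ((pvDiffs p).length : Int) - L + 1 = ((pvDiffs p).length : Int) + 1 - L := by omega
  rw [hb]
  have hloop := pv_loop p L hPre (pvDiffs p).length le_rfl
  have := congrArg (fun st => st.1.items) hloop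
  exact this.symm
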